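-- pv_equiv track=rewrite | github.com/pythonmaster9000/julgonu | scratch_229.py | colliding
-- ===== SOURCE A (Python) =====
-- pieces = {
--     'piecesBlack': {
--         'b1': [0, 0],
--         'b2': [0, 1],
--         'b3': [0, 2],
--         'b4': [0, 3]
--     },
--     'piecesWhite': {
--         'w1': [3, 0],
--         'w2': [3, 1],
--         'w3': [3, 2],
--         'w4': [3, 3]
--     }
-- }
--
-- def colliding(x, y):
--     for piece in pieces['piecesBlack'].values():
--         if [x, y] == piece:
--             return False
--     for piece in pieces['piecesWhite'].values():
--         if [x, y] == piece:
--             return False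
--     return True
-- ===== SOURCE B (Python) =====
-- def colliding(x, y):
--     return not (x in (0, 3) and y in (0, 1, 2, 3))
-- ===== Notes on version B (the rewrite author's own statement) =====
-- stated objective: simpler
-- what changed: Replaced the two-loop scan over the eight hard-coded piece positions with a direct boolean predicate: occupied cells are exactly rows 0 and 3, columns 0-3.
import Mathlib
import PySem

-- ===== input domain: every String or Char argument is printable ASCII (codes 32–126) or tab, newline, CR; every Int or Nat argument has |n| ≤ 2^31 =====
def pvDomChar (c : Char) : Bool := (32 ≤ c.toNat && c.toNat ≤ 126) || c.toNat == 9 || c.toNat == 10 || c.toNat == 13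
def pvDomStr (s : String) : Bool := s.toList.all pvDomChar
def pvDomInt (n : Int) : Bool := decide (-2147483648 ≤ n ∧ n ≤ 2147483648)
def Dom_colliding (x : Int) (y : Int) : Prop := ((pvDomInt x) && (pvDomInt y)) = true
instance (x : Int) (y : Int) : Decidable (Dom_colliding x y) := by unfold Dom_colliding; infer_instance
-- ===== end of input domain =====

-- B replaces the scan over the eight hard-coded piece positions with a direct
-- boolean predicate (occupied cells are rows 0 and 3, columns 0-3): simpler.

-- ===== PORT A =====
-- the module-level `pieces` dict, as association lists in insertion order
def piecesBlack : List (String × (Int × Int)) :=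
  [("b1", (0, 0)), ("b2", (0, 1)), ("b3", (0, 2)), ("b4", (0, 3))]
def piecesWhite : List (String × (Int × Int)) :=
  [("w1", (3, 0)), ("w2", (3, 1)), ("w3", (3, 2)), ("w4", (3, 3))]

-- loop over .values(), returning False on the first match, as in A
def collideScan (x : Int) (y : Int) : List (String × (Int × Int)) → Option Bool
  | [] => none
  | (_, p) :: rest => if (x, y) = p then some false else collideScan x y rest

def colliding (x : Int) (y : Int) : Bool :=
  match collideScan x y piecesBlack with
  | some b => b
  | none =>
    match collideScan x y piecesWhite with
    | some b => b
    | none => true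

-- ===== PORT B =====
def colliding_alt (x : Int) (y : Int) : Bool :=
  !((x == 0 || x == 3) && (y == 0 || y == 1 || y == 2 || y == 3))

-- ===== PRECONDITION & SPEC =====
def Spec_colliding (x : Int) (y : Int) (out : Bool) : Prop := out = colliding_alt x y
instance (x : Int) (y : Int) (out : Bool) : Decidable (Spec_colliding x y out) := by unfold Spec_colliding; infer_instance

-- ===== CLAIM (what is proved, stated in full; the proofs are below) =====
def Claim_equal_colliding : Prop := ∀ (x : Int) (y : Int), Dom_colliding x y → Spec_colliding x y (colliding x y)

-- ===== LEMMAS AND PROOFS =====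

-- ===== VERDICT (by name: the statement is the Claim_ definition above) =====
theorem colliding_spec : Claim_equal_colliding := by
  intro x y _
  unfold Spec_colliding colliding colliding_alt piecesBlack piecesWhite
  by_cases hx0 : x = 0 <;> by_cases hx3 : x = 3 <;>
    by_cases hy0 : y = 0 <;> by_cases hy1 : y = 1 <;> by_cases hy2 : y = 2 <;> by_cases hy3 : y = 3 <;>
    simp_all [collideScan, Prod.ext_iff]
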